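-- pv_equiv track=rewrite | github.com/guihocosta/exercicios-prog-2 | 03_exercicios/aula_1.py | calcular_pontos_cnh_5b
-- ===== SOURCE A (Python) =====
-- def calcular_pontos_cnh_5b(cnh, infracoes_recentes, veiculos, naturezas):
--     pontos = 0
--     placas_do_motorista = []
--     for placa in veiculos:
--         cnh_proprietario, _, _ = veiculos[placa]
--         if cnh_proprietario == cnh:
--             placas_do_motorista.append(placa)
--
--     for infracao in infracoes_recentes:
--         _, _, placa_multada, tipo_natureza = infracao
--         if placa_multada in placas_do_motorista:
--             if tipo_natureza in naturezas:
--                 pontos = pontos + naturezas[tipo_natureza]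
--
--     return pontos
-- ===== SOURCE B (Python) =====
-- def calcular_pontos_cnh_5b(cnh, infracoes_recentes, veiculos, naturezas):
--     # Group by nature instead of accumulating per infraction: first collect the
--     # natures of the infractions committed with the driver's vehicles, then take
--     # one weighted sum over the penalty table (points x occurrence count).
--     multadas = [nat for _, _, placa, nat in infracoes_recentes
--                 if placa in veiculos and veiculos[placa][0] == cnh]
--     return sum(pts * multadas.count(nat) for nat, pts in naturezas.items())
-- ===== Notes on version B (the rewrite author's own statement) =====
-- stated objective: alternative
-- what changed: B drops A's plate-index pass and per-infraction accumulation: it collects the natures of the driver's infractions and computes the total as one weighted sum over the penalty table (points times occurrence count per nature), i.e. a group-by-nature summation instead of a per-infraction scan of a precomputed plate list.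
import Mathlib
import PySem

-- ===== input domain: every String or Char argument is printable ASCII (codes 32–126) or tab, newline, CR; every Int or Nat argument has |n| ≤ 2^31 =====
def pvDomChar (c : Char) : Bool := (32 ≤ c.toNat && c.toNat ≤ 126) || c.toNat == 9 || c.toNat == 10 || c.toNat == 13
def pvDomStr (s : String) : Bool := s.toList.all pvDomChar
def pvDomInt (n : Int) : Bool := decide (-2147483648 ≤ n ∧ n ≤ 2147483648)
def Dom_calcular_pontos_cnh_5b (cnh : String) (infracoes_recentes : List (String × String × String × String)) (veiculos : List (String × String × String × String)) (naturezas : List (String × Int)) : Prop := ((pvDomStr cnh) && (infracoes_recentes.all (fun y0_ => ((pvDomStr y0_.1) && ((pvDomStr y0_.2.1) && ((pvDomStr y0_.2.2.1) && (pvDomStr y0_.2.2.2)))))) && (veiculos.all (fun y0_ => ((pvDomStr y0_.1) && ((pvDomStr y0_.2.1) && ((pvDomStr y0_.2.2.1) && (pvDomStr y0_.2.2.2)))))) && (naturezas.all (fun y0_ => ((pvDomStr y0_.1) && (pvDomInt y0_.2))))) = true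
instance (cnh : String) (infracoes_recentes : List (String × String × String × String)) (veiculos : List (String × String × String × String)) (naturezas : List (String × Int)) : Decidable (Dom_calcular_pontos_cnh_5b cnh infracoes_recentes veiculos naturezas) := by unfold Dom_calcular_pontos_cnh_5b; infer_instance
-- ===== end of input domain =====

-- B replaces A's plate-index pass and per-infraction accumulation by one weighted sum over the penalty table (alternative decomposition).

-- ===== PORT A =====
-- A's first loop: for each key of veiculos, look its value up and keep the plate if the owner is cnh.
def pvPlacasA (cnh : String) (veiculos : List (String × String × String × String)) :
    List (String × String × String × String) → List String
  | [] => []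
  | kv :: rest =>
    match veiculos.find? (fun e => e.1 == kv.1) with
    | some e => if e.2.1 == cnh then kv.1 :: pvPlacasA cnh veiculos rest
                else pvPlacasA cnh veiculos rest
    | none => pvPlacasA cnh veiculos rest

def calcular_pontos_cnh_5b (cnh : String) (infracoes_recentes : List (String × String × String × String)) (veiculos : List (String × String × String × String)) (naturezas : List (String × Int)) : Int :=
  infracoes_recentes.foldl (fun pontos infracao =>
    if (pvPlacasA cnh veiculos veiculos).contains infracao.2.2.1 then
      match naturezas.find? (fun e => e.1 == infracao.2.2.2) with
      | some e => pontos + e.2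
      | none => pontos
    else pontos) 0

-- ===== PORT B =====
def calcular_pontos_cnh_5b_alt (cnh : String) (infracoes_recentes : List (String × String × String × String)) (veiculos : List (String × String × String × String)) (naturezas : List (String × Int)) : Int :=
  -- multadas = [nat for _, _, placa, nat in infracoes_recentes if placa in veiculos and veiculos[placa][0] == cnh]
  let multadas := (infracoes_recentes.filter (fun i =>
      match veiculos.find? (fun e => e.1 == i.2.2.1) with
      | some dono => dono.2.1 == cnh
      | none => false)).map (fun i => i.2.2.2)
  -- sum(pts * multadas.count(nat) for nat, pts in naturezas.items())
  naturezas.foldl (fun pontos e => pontos + e.2 * (PySem.List.count multadas e.1 : Int)) 0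

-- ===== PRECONDITION & SPEC =====
-- Pre_ only states the dict invariant of naturezas (distinct keys), automatic for every
-- Python dict — it excludes no input the Python A accepts.
def Pre_calcular_pontos_cnh_5b (cnh : String) (infracoes_recentes : List (String × String × String × String)) (veiculos : List (String × String × String × String)) (naturezas : List (String × Int)) : Prop :=
  (naturezas.map Prod.fst).Nodup
instance (cnh : String) (infracoes_recentes : List (String × String × String × String)) (veiculos : List (String × String × String × String)) (naturezas : List (String × Int)) : Decidable (Pre_calcular_pontos_cnh_5b cnh infracoes_recentes veiculos naturezas) := by unfold Pre_calcular_pontos_cnh_5b; infer_instance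

def pvWitness_calcular_pontos_cnh_5b : String × (List (String × String × String × String)) × (List (String × String × String × String)) × (List (String × Int)) :=
  ("c1", [("x", "y", "P1", "grave")], [("P1", "c1", "carro", "azul")], [("grave", 5)])

def Spec_calcular_pontos_cnh_5b (cnh : String) (infracoes_recentes : List (String × String × String × String)) (veiculos : List (String × String × String × String)) (naturezas : List (String × Int)) (out : Int) : Prop := out = calcular_pontos_cnh_5b_alt cnh infracoes_recentes veiculos naturezas
instance (cnh : String) (infracoes_recentes : List (String × String × String × String)) (veiculos : List (String × String × String × String)) (naturezas : List (String × Int)) (out : Int) : Decidable (Spec_calcular_pontos_cnh_5b cnh infracoes_recentes veiculos naturezas out) := by unfold Spec_calcular_pontos_cnh_5b; infer_instance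

-- ===== CLAIM (what is proved, stated in full; the proofs are below) =====
def Claim_equal_calcular_pontos_cnh_5b : Prop := ∀ (cnh : String) (infracoes_recentes : List (String × String × String × String)) (veiculos : List (String × String × String × String)) (naturezas : List (String × Int)), Dom_calcular_pontos_cnh_5b cnh infracoes_recentes veiculos naturezas → Pre_calcular_pontos_cnh_5b cnh infracoes_recentes veiculos naturezas → Spec_calcular_pontos_cnh_5b cnh infracoes_recentes veiculos naturezas (calcular_pontos_cnh_5b cnh infracoes_recentes veiculos naturezas)

-- ===== LEMMAS AND PROOFS =====

-- first-match value of a nature in the penalty table (0 when absent)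
def pvLook (naturezas : List (String × Int)) (n : String) : Int :=
  match naturezas.find? (fun e => e.1 == n) with
  | some e => e.2
  | none => 0

-- pointwise-equal step functions fold alike
theorem pvFoldlExt {α β : Type} {f g : β → α → β} (h : ∀ b a, f b a = g b a) (init : β) (l : List α) :
    l.foldl f init = l.foldl g init := by
  induction l generalizing init with
  | nil => rfl
  | cons x xs ih => simp only [List.foldl_cons, h, ih]

-- membership in A's plate index, over any suffix of the vehicle dict
theorem mem_pvPlacasA (cnh p : String) (veiculos l : List (String × String × String × String)) :
    p ∈ pvPlacasA cnh veiculos l ↔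
      ∃ kv ∈ l, kv.1 = p ∧
        (match veiculos.find? (fun e => e.1 == kv.1) with
         | some e => e.2.1 = cnh
         | none => False) := by
  induction l with
  | nil => simp [pvPlacasA]
  | cons kv rest ih =>
    simp only [pvPlacasA]
    cases h : veiculos.find? (fun e => e.1 == kv.1) with
    | none =>
      rw [ih]
      constructor
      · rintro ⟨x, hx, hxp, hc⟩; exact ⟨x, List.mem_cons_of_mem _ hx, hxp, hc⟩
      · rintro ⟨x, hx, hxp, hc⟩
        rcases List.mem_cons.mp hx with rfl | hx
        · rw [h] at hc; exact hc.elim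
        · exact ⟨x, hx, hxp, hc⟩
    | some e =>
      dsimp only
      by_cases he : e.2.1 = cnh
      · rw [if_pos (by simp [he])]
        simp only [List.mem_cons, ih]
        constructor
        · rintro (rfl | ⟨x, hx, hxp, hc⟩)
          · exact ⟨kv, Or.inl rfl, rfl, by rw [h]; exact he⟩
          · exact ⟨x, Or.inr hx, hxp, hc⟩
        · rintro ⟨x, (rfl | hx), hxp, hc⟩
          · exact Or.inl hxp.symm
          · exact Or.inr ⟨x, hx, hxp, hc⟩
      · rw [if_neg (by simp [he])]
        rw [ih]
        constructor
        · rintro ⟨x, hx, hxp, hc⟩; exact ⟨x, List.mem_cons_of_mem _ hx, hxp, hc⟩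
        · rintro ⟨x, hx, hxp, hc⟩
          rcases List.mem_cons.mp hx with rfl | hx
          · rw [h] at hc; exact absurd hc he
          · exact ⟨x, hx, hxp, hc⟩

-- the index membership test equals the direct owner lookup
theorem contains_pvPlacasA (cnh p : String) (veiculos : List (String × String × String × String)) :
    (pvPlacasA cnh veiculos veiculos).contains p =
      (match veiculos.find? (fun e => e.1 == p) with
       | some dono => dono.2.1 == cnh
       | none => false) := by
  cases h : veiculos.find? (fun e => e.1 == p) with
  | none =>
    rw [Bool.eq_false_iff]
    intro hc
    have hmem := (mem_pvPlacasA cnh p veiculos veiculos).mp (List.contains_iff_mem.mp hc)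
    rcases hmem with ⟨kv, _, rfl, hcond⟩
    rw [h] at hcond; exact hcond
  | some dono =>
    dsimp only
    have h1 : dono.1 = p := by have := List.find?_some h; simpa using this
    by_cases he : dono.2.1 = cnh
    · have hmem : p ∈ pvPlacasA cnh veiculos veiculos := by
        rw [mem_pvPlacasA]
        exact ⟨dono, List.mem_of_find?_eq_some h, h1, by rw [h1, h]; exact he⟩
      simp [hmem, he]
    · have hnm : p ∉ pvPlacasA cnh veiculos veiculos := by
        rw [mem_pvPlacasA]
        rintro ⟨kv, _, rfl, hcond⟩
        rw [h] at hcond; exact absurd hcond he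
      simp [hnm, he]

-- summing an ite-valued map is summing over the filtered list
theorem pvSumIteFilter {α : Type} (c : α → Bool) (g : α → Int) (l : List α) :
    (l.map (fun x => if c x then g x else 0)).sum = ((l.filter c).map g).sum := by
  induction l with
  | nil => rfl
  | cons x xs ih =>
    by_cases hx : c x = true
    · simp [hx, List.filter_cons, ih]
    · simp only [Bool.not_eq_true] at hx
      simp [hx, List.filter_cons, ih]

-- absent key: the one-hot sum over the table is 0
theorem pvOneHotZero (l : List (String × Int)) (n : String) (h : ∀ e ∈ l, e.1 ≠ n) :
    (l.map (fun e => if e.1 == n then e.2 else 0)).sum = 0 := by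
  induction l with
  | nil => rfl
  | cons e t ih =>
    have he : e.1 ≠ n := h e (List.mem_cons_self)
    simp only [List.map_cons, List.sum_cons]
    rw [ih (fun x hx => h x (List.mem_cons_of_mem _ hx))]
    simp [he]

-- distinct keys: the one-hot sum over the table is the first-match lookup
theorem pvOneHotLook (l : List (String × Int)) (n : String) (h : (l.map Prod.fst).Nodup) :
    (l.map (fun e => if e.1 == n then e.2 else 0)).sum = pvLook l n := by
  induction l with
  | nil => rfl
  | cons e t ih =>
    simp only [List.map_cons, List.nodup_cons] at h
    by_cases hk : e.1 = n
    · have ht : ∀ x ∈ t, x.1 ≠ n := by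
        intro x hx hxn
        exact h.1 (by rw [hk, ← hxn]; exact List.mem_map_of_mem hx)
      simp only [List.map_cons, List.sum_cons, if_pos (by simpa using hk)]
      rw [pvOneHotZero t n ht]
      simp [pvLook, List.find?_cons, hk]
    · simp only [List.map_cons, List.sum_cons, if_neg (by simpa using hk)]
      rw [ih h.2]
      simp [pvLook, List.find?_cons, (by simpa using hk : (e.1 == n) = false)]

-- exchange of summation: per-occurrence lookup sum = weighted count sum over the table
theorem pvExchange (naturezas : List (String × Int)) (h : (naturezas.map Prod.fst).Nodup) :
    ∀ ms : List String,
      (ms.map (pvLook naturezas)).sum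
        = (naturezas.map (fun e => e.2 * (List.count e.1 ms : Int))).sum := by
  intro ms
  induction ms with
  | nil => simp
  | cons n ms ih =>
    simp only [List.map_cons, List.sum_cons, ih]
    have hcount : ∀ e : String × Int,
        e.2 * (List.count e.1 (n :: ms) : Int)
          = (if e.1 == n then e.2 else 0) + e.2 * (List.count e.1 ms : Int) := by
      intro e
      rw [List.count_cons]
      rcases eq_or_ne e.1 n with hk | hk
      · rw [if_pos (beq_iff_eq.mpr hk.symm), if_pos (beq_iff_eq.mpr hk)]
        push_cast; ring
      · rw [if_neg (by simpa using Ne.symm hk), if_neg (by simpa using hk)]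
        push_cast; ring
    calc pvLook naturezas n + (naturezas.map (fun e => e.2 * (List.count e.1 ms : Int))).sum
        = (naturezas.map (fun e => if e.1 == n then e.2 else 0)).sum
            + (naturezas.map (fun e => e.2 * (List.count e.1 ms : Int))).sum := by
          rw [pvOneHotLook naturezas n h]
      _ = (naturezas.map (fun e => (if e.1 == n then e.2 else 0) + e.2 * (List.count e.1 ms : Int))).sum := by
          rw [PySem.List.sum_map_add_int]
      _ = (naturezas.map (fun e => e.2 * (List.count e.1 (n :: ms) : Int))).sum := by
          apply congrArg
          apply List.map_congr_left
          intro e _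
          rw [hcount e]

-- ===== VERDICT (by name: the statement is the Claim_ definition above) =====
theorem calcular_pontos_cnh_5b_spec : Claim_equal_calcular_pontos_cnh_5b := by
  intro cnh infr veic nat _ hpre
  unfold Spec_calcular_pontos_cnh_5b calcular_pontos_cnh_5b calcular_pontos_cnh_5b_alt
  have hA : infr.foldl (fun pontos infracao =>
      if (pvPlacasA cnh veic veic).contains infracao.2.2.1 then
        match nat.find? (fun e => e.1 == infracao.2.2.2) with
        | some e => pontos + e.2
        | none => pontos
      else pontos) 0
      = infr.foldl (fun pontos infracao =>
          pontos + (if (match veic.find? (fun e => e.1 == infracao.2.2.1) with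
                        | some dono => dono.2.1 == cnh
                        | none => false) then pvLook nat infracao.2.2.2 else 0)) 0 := by
    apply pvFoldlExt
    intro p i
    rw [contains_pvPlacasA]
    by_cases hc : (match veic.find? (fun e => e.1 == i.2.2.1) with
                   | some dono => dono.2.1 == cnh
                   | none => false) = true
    · rw [if_pos hc, if_pos hc]
      unfold pvLook
      cases nat.find? (fun e => e.1 == i.2.2.2) with
      | none => simp
      | some e => rfl
    · simp only [Bool.not_eq_true] at hc
      rw [if_neg (by simp [hc]), if_neg (by simp [hc])]
      simp
  rw [hA, PySem.List.foldl_add, PySem.List.foldl_add, zero_add, zero_add]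
  rw [pvSumIteFilter]
  simp only [PySem.List.count_eq]
  rw [← pvExchange nat hpre, List.map_map]
  rfl
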